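-- pv_equiv track=rewrite | github.com/gmichaeljaison/interview-questions | probs/misc/complete_kraken.py | ways_to_kraken
-- ===== SOURCE A (Python) =====
-- def ways_to_kraken(m, n):
--     res = [[1 for _ in range(n)] for _ in range(m)]
--
--     for row in range(m):
--         for col in range(n):
--             if col == 0 or row == 0:
--                 continue
--
--             res[row][col] = res[row-1][col] + res[row][col-1] + res[row-1][col-1]
--     return res
-- ===== SOURCE B (Python) =====
-- def ways_to_kraken(m, n):
--     # each cell is computed independently as the Delannoy number
--     # D(i,j) = sum_k C(i,k)*C(j,k)*2^k (closed form, no neighbour DP);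
--     # the binomials and the power are maintained incrementally along k.
--     def delannoy(i, j):
--         total = 0
--         ci = cj = p = 1
--         for k in range(min(i, j) + 1):
--             total += ci * cj * p
--             ci = ci * (i - k) // (k + 1)
--             cj = cj * (j - k) // (k + 1)
--             p = p * 2
--         return total
--
--     return [[delannoy(i, j) for j in range(n)] for i in range(m)]
-- ===== Notes on version B (the rewrite author's own statement) =====
-- stated objective: alternative
-- what changed: Replaced the three-neighbour in-place DP over the grid with an independent closed-form evaluation of each cell as the Delannoy number D(i,j) = sum_k C(i,k)*C(j,k)*2^k, with binomials and power maintained incrementally along k.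
import Mathlib
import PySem

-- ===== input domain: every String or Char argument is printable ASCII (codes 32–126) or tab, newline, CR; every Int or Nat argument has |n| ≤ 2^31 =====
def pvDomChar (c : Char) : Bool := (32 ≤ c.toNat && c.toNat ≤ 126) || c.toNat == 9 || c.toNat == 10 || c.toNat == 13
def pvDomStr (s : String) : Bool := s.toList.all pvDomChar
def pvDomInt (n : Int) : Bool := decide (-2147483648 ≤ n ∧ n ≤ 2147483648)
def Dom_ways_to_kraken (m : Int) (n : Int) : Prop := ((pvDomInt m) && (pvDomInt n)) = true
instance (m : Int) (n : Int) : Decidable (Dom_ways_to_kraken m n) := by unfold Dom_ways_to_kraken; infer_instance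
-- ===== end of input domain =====

-- B replaces A's in-place three-neighbour DP with an independent closed-form evaluation of
-- each cell as the Delannoy number D(i,j) = Σ_k C(i,k)·C(j,k)·2^k (objective: alternative).

-- ===== PORT A =====
-- row/col indices come from range(m)/range(n) and are nonnegative, so Nat indexing is exact
-- (List.range m.toNat is empty for m ≤ 0 exactly like range(m)); the getD defaults are never
-- used: every index read by the loop is in range.
def ways_to_kraken (m : Int) (n : Int) : List (List Int) :=
  (List.range m.toNat).foldl (fun res row =>
    (List.range n.toNat).foldl (fun res col =>
      if col = 0 ∨ row = 0 then res
      else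
        res.set row ((res.getD row []).set col
          ((res.getD (row - 1) []).getD col 0 + (res.getD row []).getD (col - 1) 0 +
           (res.getD (row - 1) []).getD (col - 1) 0))) res)
    (List.replicate m.toNat (List.replicate n.toNat (1 : Int)))

-- ===== PORT B =====
-- helper delannoy: state (total, ci, cj, p); total += ci*cj*p, then
-- ci = ci*(i-k)//(k+1), cj = cj*(j-k)//(k+1), p = p*2 over k in range(min(i,j)+1)
def pyDelannoy (i j : Nat) : Int :=
  ((List.range (min i j + 1)).foldl
    (fun (s : Int × Int × Int × Int) (k : Nat) =>
      (s.1 + s.2.1 * s.2.2.1 * s.2.2.2,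
       PySem.Int.floordiv (s.2.1 * ((i : Int) - (k : Int))) ((k : Int) + 1),
       PySem.Int.floordiv (s.2.2.1 * ((j : Int) - (k : Int))) ((k : Int) + 1),
       s.2.2.2 * 2)) (0, 1, 1, 1)).1

def ways_to_kraken_alt (m : Int) (n : Int) : List (List Int) :=
  (List.range m.toNat).map (fun i => (List.range n.toNat).map (fun j => pyDelannoy i j))

-- ===== PRECONDITION & SPEC =====
def Spec_ways_to_kraken (m : Int) (n : Int) (out : List (List Int)) : Prop := out = ways_to_kraken_alt m n
instance (m : Int) (n : Int) (out : List (List Int)) : Decidable (Spec_ways_to_kraken m n out) := by unfold Spec_ways_to_kraken; infer_instance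

-- ===== CLAIM (what is proved, stated in full; the proofs are below) =====
def Claim_equal_ways_to_kraken : Prop := ∀ (m : Int) (n : Int), Dom_ways_to_kraken m n → Spec_ways_to_kraken m n (ways_to_kraken m n)

-- ===== LEMMAS AND PROOFS =====

-- the Delannoy summand pvF, its partial sums pvS, and the Delannoy number pvDel
def pvF (i j k : Nat) : Int := (i.choose k : Int) * (j.choose k : Int) * 2 ^ k
def pvS (N i j : Nat) : Int := ∑ k ∈ Finset.range N, pvF i j k
def pvDel (i j : Nat) : Int := pvS (min i j + 1) i j

-- B's incremental quotient step computes the next binomial coefficient exactly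
theorem pvCombStep (a b : Nat) :
    PySem.Int.floordiv ((a.choose b : Int) * ((a : Int) - (b : Int))) ((b : Int) + 1)
      = (a.choose (b+1) : Int) := by
  by_cases h : b < a
  · have h1 : ((a : Int) - b) = ((a - b : Nat) : Int) := by push_cast [h.le]; ring
    rw [h1, ← Int.natCast_mul, ← Nat.choose_succ_right_eq]
    have h2 : ((b : Int) + 1) = ((b + 1 : Nat) : Int) := by push_cast; ring
    rw [h2, PySem.Int.floordiv_natCast, Nat.mul_div_cancel _ (by omega)]
  · have h0 : (a.choose b : Int) * ((a : Int) - b) = 0 := by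
      rcases Nat.lt_or_ge a b with hlt | hge
      · simp [Nat.choose_eq_zero_of_lt hlt]
      · have : a = b := le_antisymm (Nat.le_of_not_lt h) hge
        simp [this]
    rw [h0]
    have : a.choose (b+1) = 0 := Nat.choose_eq_zero_of_lt (by omega)
    rw [this, PySem.Int.floordiv_eq_ediv_of_pos (by positivity)]
    simp

-- loop invariant of B's per-cell fold: (partial sum, C(i,K), C(j,K), 2^K)
theorem pvLoop_inv (i j : Nat) : ∀ K : Nat,
    (List.range K).foldl
      (fun (s : Int × Int × Int × Int) (k : Nat) =>
        (s.1 + s.2.1 * s.2.2.1 * s.2.2.2,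
         PySem.Int.floordiv (s.2.1 * ((i : Int) - (k : Int))) ((k : Int) + 1),
         PySem.Int.floordiv (s.2.2.1 * ((j : Int) - (k : Int))) ((k : Int) + 1),
         s.2.2.2 * 2)) (0, 1, 1, 1)
    = (pvS K i j, (i.choose K : Int), (j.choose K : Int), (2 : Int) ^ K) := by
  intro K
  induction K with
  | zero => simp [pvS]
  | succ K ih =>
    rw [List.range_succ, List.foldl_append, ih]
    simp only [List.foldl_cons, List.foldl_nil]
    rw [pvCombStep i K, pvCombStep j K]
    unfold pvS
    rw [Finset.sum_range_succ]
    simp [pvF, pow_succ, mul_comm]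

theorem pvDelannoy_eq (i j : Nat) : pyDelannoy i j = pvDel i j := by
  unfold pyDelannoy pvDel
  rw [pvLoop_inv i j (min i j + 1)]

-- the sum may be extended beyond min i j: the extra summands vanish
theorem pvS_ext (i j N : Nat) (h : min i j + 1 ≤ N) : pvS N i j = pvDel i j := by
  unfold pvDel pvS
  have hsub : Finset.range (min i j + 1) ⊆ Finset.range N := by
    intro x hx; simp only [Finset.mem_range] at hx ⊢; omega
  refine (Finset.sum_subset hsub ?_).symm
  intro k _ hk
  simp only [Finset.mem_range, not_lt] at hk
  have : i.choose k = 0 ∨ j.choose k = 0 := by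
    rcases Nat.le_total i j with hm | hm
    · exact Or.inl (Nat.choose_eq_zero_of_lt (by omega))
    · exact Or.inr (Nat.choose_eq_zero_of_lt (by omega))
  rcases this with h0 | h0 <;> simp [pvF, h0]

theorem pvDel_zero_left (j : Nat) : pvDel 0 j = 1 := by
  simp [pvDel, pvS, pvF]

theorem pvDel_zero_right (i : Nat) : pvDel i 0 = 1 := by
  simp [pvDel, pvS, pvF]

theorem pvS_succ' (x y N : Nat) :
    pvS (N+1) x y = (∑ k ∈ Finset.range N, pvF x y (k+1)) + 1 := by
  unfold pvS
  rw [Finset.sum_range_succ']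
  simp [pvF]

-- pointwise Pascal expansion of the Delannoy summand
theorem pvTerm_id (i j k : Nat) :
    pvF (i+1) (j+1) (k+1) + 2 * pvF i j (k+1)
      = pvF i (j+1) (k+1) + pvF (i+1) j (k+1) + pvF i j (k+1) + 2 * pvF i j k := by
  simp only [pvF, Nat.choose_succ_succ]
  push_cast
  ring

-- the closed form satisfies A's three-neighbour recurrence
theorem pvDel_rec (i j : Nat) :
    pvDel (i+1) (j+1) = pvDel i (j+1) + pvDel (i+1) j + pvDel i j := by
  set N := i + j + 1 with hN
  have e1 : pvS (N+1) (i+1) (j+1) = pvDel (i+1) (j+1) := pvS_ext _ _ _ (by omega)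
  have e2 : pvS (N+1) i (j+1) = pvDel i (j+1) := pvS_ext _ _ _ (by omega)
  have e3 : pvS (N+1) (i+1) j = pvDel (i+1) j := pvS_ext _ _ _ (by omega)
  have e4 : pvS (N+1) i j = pvDel i j := pvS_ext _ _ _ (by omega)
  have e5 : pvS N i j = pvDel i j := pvS_ext _ _ _ (by omega)
  have hsum : ∑ k ∈ Finset.range N, (pvF (i+1) (j+1) (k+1) + 2 * pvF i j (k+1))
      = ∑ k ∈ Finset.range N, (pvF i (j+1) (k+1) + pvF (i+1) j (k+1) + pvF i j (k+1) + 2 * pvF i j k) :=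
    Finset.sum_congr rfl (fun k _ => pvTerm_id i j k)
  simp only [Finset.sum_add_distrib, ← Finset.mul_sum] at hsum
  have k1 := pvS_succ' (i+1) (j+1) N
  have k2 := pvS_succ' i (j+1) N
  have k3 := pvS_succ' (i+1) j N
  have k4 := pvS_succ' i j N
  have k5 : pvS N i j = ∑ k ∈ Finset.range N, pvF i j k := rfl
  linarith

-- grid states of A's double loop: rows < r finished, row r finished up to column c, rest untouched
def pvRowMix (n' r c : Nat) : List Int := (List.range n').map (fun j => if j < c then pvDel r j else 1)
def pvSt (m' n' r c : Nat) : List (List Int) :=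
  (List.range m').map (fun i =>
    if i < r then (List.range n').map (fun j => pvDel i j)
    else if i = r then pvRowMix n' r c else List.replicate n' (1 : Int))

theorem pvSt_getD (m' n' r c i : Nat) (hi : i < m') :
    (pvSt m' n' r c).getD i []
      = (if i < r then (List.range n').map (fun j => pvDel i j)
         else if i = r then pvRowMix n' r c else List.replicate n' (1 : Int)) := by
  simp [pvSt, List.getD_eq_getElem?_getD, hi]

theorem pvRow_getD (n' r c j : Nat) (hj : j < n') :
    (pvRowMix n' r c).getD j 0 = (if j < c then pvDel r j else 1) := by
  simp [pvRowMix, List.getD_eq_getElem?_getD, hj]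

theorem pvDelRow_getD (n' i j : Nat) (hj : j < n') :
    ((List.range n').map (fun j => pvDel i j)).getD j 0 = pvDel i j := by
  simp [List.getD_eq_getElem?_getD, hj]

theorem pvRowMix_set (n' r c : Nat) (hc : c < n') :
    (pvRowMix n' r c).set c (pvDel r c) = pvRowMix n' r (c+1) := by
  apply List.ext_getElem
  · simp [pvRowMix]
  · intro k h1 h2
    simp only [pvRowMix, List.length_set, List.length_map, List.length_range] at h1 h2
    simp only [List.getElem_set, pvRowMix, List.getElem_map, List.getElem_range]
    split_ifs <;> first | rfl | omega | simp_all

theorem pvRowMix_zero (n' r : Nat) : pvRowMix n' r 0 = List.replicate n' (1 : Int) := by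
  apply List.ext_getElem <;> simp [pvRowMix]

theorem pvSt_set (m' n' r c : Nat) (_hr : r < m') :
    (pvSt m' n' r c).set r (pvRowMix n' r (c+1)) = pvSt m' n' r (c+1) := by
  apply List.ext_getElem
  · simp [pvSt]
  · intro k h1 h2
    simp only [pvSt, List.getElem_set, List.getElem_map, List.getElem_range]
    split_ifs <;> first | rfl | omega

theorem pvSt_congr (m' n' r c c' : Nat) (h : pvRowMix n' r c = pvRowMix n' r c') :
    pvSt m' n' r c = pvSt m' n' r c' := by
  unfold pvSt
  exact List.map_congr_left (fun i _ => by rw [h])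

-- one iteration of the inner loop advances the state by one column
theorem pvStep (m' n' r c : Nat) (hr : r < m') (hc : c < n') :
    (if c = 0 ∨ r = 0 then pvSt m' n' r c
     else (pvSt m' n' r c).set r (((pvSt m' n' r c).getD r []).set c
       (((pvSt m' n' r c).getD (r-1) []).getD c 0 + ((pvSt m' n' r c).getD r []).getD (c-1) 0 +
        ((pvSt m' n' r c).getD (r-1) []).getD (c-1) 0)))
    = pvSt m' n' r (c+1) := by
  by_cases h0 : c = 0 ∨ r = 0
  · rw [if_pos h0]
    apply pvSt_congr
    apply List.map_congr_left
    intro j hj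
    rcases h0 with h0 | h0
    · subst h0
      by_cases hj1 : j < 1
      · have hj0 : j = 0 := by omega
        subst hj0
        simp [pvDel_zero_right]
      · rw [if_neg (by omega), if_neg hj1]
    · subst h0
      simp [pvDel_zero_left]
  · push_neg at h0
    obtain ⟨hcne, hrne⟩ := h0
    rw [if_neg (by tauto)]
    have g1 : (pvSt m' n' r c).getD r [] = pvRowMix n' r c := by
      rw [pvSt_getD _ _ _ _ _ hr]; simp
    have g2 : (pvSt m' n' r c).getD (r-1) [] = (List.range n').map (fun j => pvDel (r-1) j) := by
      rw [pvSt_getD _ _ _ _ _ (by omega)]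
      rw [if_pos (by omega)]
    rw [g1, g2, pvDelRow_getD _ _ _ hc, pvDelRow_getD _ _ _ (by omega),
        pvRow_getD _ _ _ _ (by omega), if_pos (by omega)]
    have hval : pvDel (r-1) c + pvDel r (c-1) + pvDel (r-1) (c-1) = pvDel r c := by
      obtain ⟨r', rfl⟩ := Nat.exists_eq_succ_of_ne_zero hrne
      obtain ⟨c', rfl⟩ := Nat.exists_eq_succ_of_ne_zero hcne
      simpa [Nat.succ_sub_one] using (pvDel_rec r' c').symm
    rw [hval, pvRowMix_set _ _ _ hc, pvSt_set _ _ _ _ hr]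

theorem pvInner (m' n' r : Nat) (hr : r < m') : ∀ c, c ≤ n' →
    (List.range c).foldl (fun res col =>
      if col = 0 ∨ r = 0 then res
      else res.set r ((res.getD r []).set col
        ((res.getD (r - 1) []).getD col 0 + (res.getD r []).getD (col - 1) 0 +
         (res.getD (r - 1) []).getD (col - 1) 0))) (pvSt m' n' r 0) = pvSt m' n' r c := by
  intro c
  induction c with
  | zero => intro _; simp
  | succ c ih =>
    intro hc
    rw [List.range_succ, List.foldl_append, ih (by omega)]
    simpa using pvStep m' n' r c hr (by omega)

theorem pvSt_next (m' n' r : Nat) : pvSt m' n' r n' = pvSt m' n' (r+1) 0 := by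
  unfold pvSt
  apply List.map_congr_left
  intro i hi
  by_cases h1 : i < r
  · rw [if_pos h1, if_pos (by omega)]
  · by_cases h2 : i = r
    · subst h2
      rw [if_neg h1, if_pos rfl, if_pos (by omega)]
      unfold pvRowMix
      apply List.map_congr_left
      intro j hj
      simp only [List.mem_range] at hj
      rw [if_pos hj]
    · rw [if_neg h1, if_neg h2, if_neg (by omega)]
      by_cases h3 : i = r + 1
      · rw [if_pos h3, pvRowMix_zero]
      · rw [if_neg h3]

theorem pvSt_init (m' n' : Nat) :
    List.replicate m' (List.replicate n' (1 : Int)) = pvSt m' n' 0 0 := by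
  unfold pvSt
  apply List.ext_getElem
  · simp
  · intro k h1 h2
    simp only [List.getElem_replicate, List.getElem_map, List.getElem_range]
    rw [if_neg (by omega)]
    by_cases hk : k = 0
    · rw [if_pos hk, pvRowMix_zero]
    · rw [if_neg hk]

theorem pvOuter (m' n' : Nat) : ∀ r, r ≤ m' →
    (List.range r).foldl (fun res row =>
      (List.range n').foldl (fun res col =>
        if col = 0 ∨ row = 0 then res
        else res.set row ((res.getD row []).set col
          ((res.getD (row - 1) []).getD col 0 + (res.getD row []).getD (col - 1) 0 +
           (res.getD (row - 1) []).getD (col - 1) 0)) ) res) (pvSt m' n' 0 0)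
    = pvSt m' n' r 0 := by
  intro r
  induction r with
  | zero => intro _; simp
  | succ r ih =>
    intro hr
    rw [List.range_succ, List.foldl_append, ih (by omega)]
    simp only [List.foldl_cons, List.foldl_nil]
    rw [pvInner m' n' r (by omega) n' le_rfl, pvSt_next]

theorem pvA_eq (m n : Int) :
    ways_to_kraken m n =
      (List.range m.toNat).map (fun i => (List.range n.toNat).map (fun j => pvDel i j)) := by
  unfold ways_to_kraken
  rw [pvSt_init m.toNat n.toNat, pvOuter m.toNat n.toNat m.toNat le_rfl]
  unfold pvSt
  apply List.map_congr_left
  intro i hi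
  simp only [List.mem_range] at hi
  rw [if_pos hi]

-- ===== VERDICT (by name: the statement is the Claim_ definition above) =====
theorem ways_to_kraken_spec : Claim_equal_ways_to_kraken := by
  intro m n _
  unfold Spec_ways_to_kraken ways_to_kraken_alt
  rw [pvA_eq]
  exact List.map_congr_left (fun i _ => List.map_congr_left (fun j _ => (pvDelannoy_eq i j).symm))
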